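-- pv_equiv track=rewrite | github.com/normeow/Interview-Preparation | ProblemsSolving/DP/turtle/turtle_04.py | solution
-- ===== SOURCE A (Python) =====
-- def solution(way, n, m):
--     def get_num(ans, way, i, j):
--         if way == '':
--             return 0
--
--
--         if way[0] == 'R':
--             return get_num(ans, way[1:], i, j-1)
--         else:
--             if j == 0:
--                 return get_num(ans, way[1:], i-1, j)
--             else:
--                 return ans[i][j-1] + get_num(ans, way[1:], i-1, j)
--
--     mat = [[0] * m for _ in range(n)]
--
--     for i in range(n):
--         for j in range(m):
--             if i == 0 or j == 0:
--                 mat[i][j] = 1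
--             else:
--                 mat[i][j] = mat[i-1][j] + mat[i][j-1]
--
--     return get_num(mat, way, n-1, m-1) + 1
-- ===== SOURCE B (Python) =====
-- def solution(way, n, m):
--     # Closed form: the DP table A builds is Pascal's triangle, mat[i][j] = C(i+j, i).
--     # Walk the move string once, adding C(i+j-1, i) for each down-move taken at column j != 0.
--     def comb(a, k):
--         if k < 0 or a < k:
--             return 0
--         c = 1
--         for t in range(k):
--             c = c * (a - t) // (t + 1)
--         return c
--
--     total = 0
--     i, j = n - 1, m - 1
--     for ch in way:
--         if ch == 'R':
--             j -= 1
--         else: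
--             if j != 0:
--                 total += comb(i + j - 1, i)
--             i -= 1
--     return total + 1
-- ===== Notes on version B (the rewrite author's own statement) =====
-- stated objective: alternative
-- what changed: Replaces A's O(n*m) DP table plus recursion over the move string by a single left-to-right loop that directly computes each needed table entry as a binomial coefficient C(i+j-1, i) via a multiplicative comb helper, so no table is built at all.
-- outside the precondition, e.g. on solution('DDD', 2, 2): A returns 4, B returns 3; on solution('D', 3, -1): A raises IndexError, B returns 1
import Mathlib
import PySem

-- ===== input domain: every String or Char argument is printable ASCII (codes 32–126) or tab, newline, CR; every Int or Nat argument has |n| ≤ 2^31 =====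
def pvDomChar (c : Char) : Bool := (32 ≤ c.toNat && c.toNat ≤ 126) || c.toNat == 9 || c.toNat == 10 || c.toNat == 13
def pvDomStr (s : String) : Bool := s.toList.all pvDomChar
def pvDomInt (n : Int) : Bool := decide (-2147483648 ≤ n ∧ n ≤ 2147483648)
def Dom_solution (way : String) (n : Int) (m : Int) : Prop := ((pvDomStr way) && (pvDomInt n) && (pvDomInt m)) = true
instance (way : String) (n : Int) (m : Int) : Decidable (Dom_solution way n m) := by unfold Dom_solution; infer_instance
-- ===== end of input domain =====

-- B replaces A's O(n*m) DP table + recursion over the move string by a single left-to-right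
-- pass that adds a directly computed binomial coefficient C(i+j-1, i) per down-move (alternative decomposition).

-- ===== PORT A =====
-- helper: the inner function get_num; ans[i][j-1] via pyGet? (none = IndexError)
def pvGetNum (ans : List (List Int)) : List Char → Int → Int → Option Int
  | [], _, _ => some 0
  | c :: rest, i, j =>
    if c = 'R' then pvGetNum ans rest i (j - 1)
    else if j = 0 then pvGetNum ans rest (i - 1) j
    else
      match PySem.List.pyGet? ans i with
      | none => none
      | some row =>
        match PySem.List.pyGet? row (j - 1) with
        | none => none
        | some v => (pvGetNum ans rest (i - 1) j).map (fun t => v + t)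

-- helper: mat[i][j] read (indices are in range whenever A reads them in the table build)
def pvCell (mat : List (List Int)) (i j : Int) : Int :=
  PySem.List.pyGetD (PySem.List.pyGetD mat i []) j 0

-- the two nested for-loops building mat
def pvBuildMat (n m : Int) : List (List Int) :=
  let mat0 := (PySem.List.pyRange 0 n 1).map (fun _ => List.replicate m.toNat (0 : Int))
  (PySem.List.pyRange 0 n 1).foldl (fun mat i =>
    (PySem.List.pyRange 0 m 1).foldl (fun mat j =>
      if i = 0 ∨ j = 0 then
        PySem.List.pySetD mat i (PySem.List.pySetD (PySem.List.pyGetD mat i []) j 1)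
      else
        PySem.List.pySetD mat i (PySem.List.pySetD (PySem.List.pyGetD mat i []) j
          (pvCell mat (i - 1) j + pvCell mat i (j - 1)))) mat) mat0

def solution (way : String) (n : Int) (m : Int) : Int :=
  match pvGetNum (pvBuildMat n m) way.toList (n - 1) (m - 1) with
  | some t => t + 1
  | none => 0   -- unreachable under Pre_ (Python raises IndexError here)

-- ===== PORT B =====
-- helper: Source B's comb(a, k) — multiplicative loop, 0 outside 0 ≤ k ≤ a
def pvComb (a k : Int) : Int :=
  if k < 0 ∨ a < k then 0
  else (PySem.List.pyRange 0 k 1).foldl (fun c t => PySem.Int.floordiv (c * (a - t)) (t + 1)) 1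

-- helper: the loop body of Source B's single pass, state (i, j, total)
def pvStep (s : Int × Int × Int) (ch : Char) : Int × Int × Int :=
  if ch = 'R' then (s.1, s.2.1 - 1, s.2.2)
  else if s.2.1 = 0 then (s.1 - 1, s.2.1, s.2.2)
  else (s.1 - 1, s.2.1, s.2.2 + pvComb (s.1 + s.2.1 - 1) s.1)

def solution_alt (way : String) (n : Int) (m : Int) : Int :=
  (way.toList.foldl pvStep (n - 1, m - 1, 0)).2.2 + 1

-- ===== PRECONDITION & SPEC =====
-- Pre_ excludes move strings that step outside the n×m table: an off-grid path is a corner no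
-- caller specifies — A raises IndexError there or (for small excursions) returns a value produced
-- by Python negative-index wraparound, while B returns its combinatorial extension.
def Pre_solution (way : String) (n : Int) (m : Int) : Prop :=
  ∀ k ∈ List.range way.toList.length,
    (way.toList.getD k ' ' ≠ 'R' ∧ m - 1 - ((way.toList.take k).count 'R' : Int) ≠ 0) →
    ((k : Int) - ((way.toList.take k).count 'R' : Int) ≤ n - 1 ∧
     ((way.toList.take k).count 'R' : Int) ≤ m - 2)
instance (way : String) (n : Int) (m : Int) : Decidable (Pre_solution way n m) := by
  unfold Pre_solution; infer_instance

def pvWitness_solution : String × Int × Int := ("DR", 2, 2)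

def Spec_solution (way : String) (n : Int) (m : Int) (out : Int) : Prop := out = solution_alt way n m
instance (way : String) (n : Int) (m : Int) (out : Int) : Decidable (Spec_solution way n m out) := by
  unfold Spec_solution; infer_instance

-- ===== CLAIM (what is proved, stated in full; the proofs are below) =====
def Claim_equal_solution : Prop := ∀ (way : String) (n : Int) (m : Int), Dom_solution way n m → Pre_solution way n m → Spec_solution way n m (solution way n m)

-- ===== LEMMAS AND PROOFS =====

-- the Pascal row: specRow i m = [C(i+0,i), C(i+1,i), …, C(i+m-1,i)]
def specRow (i m : Nat) : List Int := (List.range m).map (fun j => ((i + j).choose i : Int))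

-- the matrix after the outer loop has processed rows < i0
def specMat (i0 n m : Nat) : List (List Int) :=
  (List.range n).map (fun i => if i < i0 then specRow i m else List.replicate m 0)

-- the row i while the inner loop has written columns < j0
def hybRow (i m j0 : Nat) : List Int :=
  (List.range m).map (fun j => if j < j0 then ((i + j).choose i : Int) else 0)

def hybMat (i n m j0 : Nat) : List (List Int) :=
  (List.range n).map (fun i' => if i' < i then specRow i' m
    else if i' = i then hybRow i m j0 else List.replicate m 0)

lemma hybRow_zero (i m : Nat) : hybRow i m 0 = List.replicate m 0 := by
  simp [hybRow]

lemma hybRow_full (i m : Nat) : hybRow i m m = specRow i m := by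
  unfold hybRow specRow
  refine List.map_congr_left ?_
  intro j hj
  simp only [List.mem_range] at hj
  simp [hj]

lemma hybMat_zero (i n m : Nat) : hybMat i n m 0 = specMat i n m := by
  unfold hybMat specMat
  refine List.map_congr_left ?_
  intro i' _
  rw [hybRow_zero]
  split_ifs <;> rfl

lemma hybMat_full (i n m : Nat) : hybMat i n m m = specMat (i + 1) n m := by
  unfold hybMat specMat
  refine List.map_congr_left ?_
  intro i' _
  rw [hybRow_full]
  rcases lt_trichotomy i' i with h|h|h
  · rw [if_pos h, if_pos (by omega)]
  · subst h
    rw [if_neg (by omega), if_pos rfl, if_pos (by omega)]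
  · rw [if_neg (by omega), if_neg (fun hh => by omega), if_neg (by omega)]

-- the inner-loop body of pvBuildMat, named for the proofs
def pvInner (mat : List (List Int)) (i j : Int) : List (List Int) :=
  if i = 0 ∨ j = 0 then
    PySem.List.pySetD mat i (PySem.List.pySetD (PySem.List.pyGetD mat i []) j 1)
  else
    PySem.List.pySetD mat i (PySem.List.pySetD (PySem.List.pyGetD mat i []) j
      (pvCell mat (i - 1) j + pvCell mat i (j - 1)))

lemma getD_map_range' {α : Type} (f : Nat → α) (n i : Nat) (d : α) (h : i < n) :
    ((List.range n).map f).getD i d = f i := by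
  rw [List.getD_eq_getElem _ _ (by simpa using h)]
  simp

lemma set_map_range {α : Type} (f : Nat → α) (n i : Nat) (v : α) :
    ((List.range n).map f).set i v
      = (List.range n).map (fun k => if k = i then v else f k) := by
  refine List.ext_getElem (by simp) ?_
  intro k h1 h2
  simp only [List.length_set, List.length_map, List.length_range] at h1
  rw [List.getElem_set]
  by_cases h : i = k
  · subst h
    simp
  · simp [h, Ne.symm h]

lemma hybMat_row (i n m j0 : Nat) (hi : i < n) :
    PySem.List.pyGetD (hybMat i n m j0) (i : Int) [] = hybRow i m j0 := by
  rw [PySem.List.pyGetD_natCast]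
  unfold hybMat
  rw [getD_map_range' _ _ _ _ hi]
  simp

lemma hybRow_set (i m j : Nat) (hj : j < m) :
    (hybRow i m j).set j (((i + j).choose i : Nat) : Int) = hybRow i m (j + 1) := by
  unfold hybRow
  rw [set_map_range]
  refine List.map_congr_left ?_
  intro k hk
  simp only [List.mem_range] at hk
  by_cases hkj : k = j
  · subst hkj; simp
  · rw [if_neg hkj]
    split_ifs with h1 h2 h2 <;> first | rfl | omega

lemma hybMat_set (i n m j0 : Nat) (r : List Int) :
    (hybMat i n m j0).set i r
      = (List.range n).map (fun i' => if i' < i then specRow i' m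
          else if i' = i then r else List.replicate m 0) := by
  unfold hybMat
  rw [set_map_range]
  refine List.map_congr_left ?_
  intro k _
  by_cases hk : k = i
  · subst hk; simp
  · rw [if_neg hk, if_neg hk]
    split_ifs <;> rfl

lemma pascal_add (i j : Nat) (hi : 1 ≤ i) (hj : 1 ≤ j) :
    ((i - 1) + j).choose (i - 1) + (i + (j - 1)).choose i = (i + j).choose i := by
  obtain ⟨a, rfl⟩ : ∃ a, i = a + 1 := ⟨i - 1, by omega⟩
  obtain ⟨b, rfl⟩ : ∃ b, j = b + 1 := ⟨j - 1, by omega⟩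
  simp only [Nat.add_sub_cancel]
  have e1 : a + (b + 1) = a + b + 1 := by omega
  have e2 : (a + 1) + b = a + b + 1 := by omega
  have e3 : (a + 1) + (b + 1) = (a + b + 1) + 1 := by omega
  rw [e1, e2, e3]
  exact (Nat.choose_succ_succ (a + b + 1) a).symm

lemma inner_step (n m : Int) (i j : Nat) (hi : i < n.toNat) (hj : j < m.toNat) :
    pvInner (hybMat i n.toNat m.toNat j) (i : Int) (j : Int)
      = hybMat i n.toNat m.toNat (j + 1) := by
  unfold pvInner
  by_cases h0 : (i : Int) = 0 ∨ (j : Int) = 0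
  · rw [if_pos h0, hybMat_row _ _ _ _ hi, PySem.List.pySetD_natCast, PySem.List.pySetD_natCast]
    have hval : (1 : Int) = (((i + j).choose i : Nat) : Int) := by
      rcases h0 with h | h
      · have : i = 0 := by omega
        subst this; simp
      · have : j = 0 := by omega
        subst this; simp
    rw [hval, hybRow_set _ _ _ hj, hybMat_set]
    rfl
  · rw [if_neg h0]
    have hi0 : ¬ (i : Int) = 0 := fun h => h0 (Or.inl h)
    have hj0 : ¬ (j : Int) = 0 := fun h => h0 (Or.inr h)
    have hi1 : 1 ≤ i := by omega
    have hj1 : 1 ≤ j := by omega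
    have hcell1 : pvCell (hybMat i n.toNat m.toNat j) ((i : Int) - 1) (j : Int)
        = (((i - 1) + j).choose (i - 1) : Nat) := by
      unfold pvCell
      have e : (i : Int) - 1 = ((i - 1 : Nat) : Int) := by omega
      rw [e, PySem.List.pyGetD_natCast, PySem.List.pyGetD_natCast]
      unfold hybMat
      rw [getD_map_range' _ _ _ _ (by omega : i - 1 < n.toNat)]
      rw [if_pos (by omega : i - 1 < i)]
      unfold specRow
      rw [getD_map_range' _ _ _ _ hj]
    have hcell2 : pvCell (hybMat i n.toNat m.toNat j) (i : Int) ((j : Int) - 1)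
        = ((i + (j - 1)).choose i : Nat) := by
      unfold pvCell
      have e : (j : Int) - 1 = ((j - 1 : Nat) : Int) := by omega
      rw [e, hybMat_row _ _ _ _ hi, PySem.List.pyGetD_natCast]
      unfold hybRow
      rw [getD_map_range' _ _ _ _ (by omega : j - 1 < m.toNat)]
      rw [if_pos (by omega : j - 1 < j)]
    rw [hcell1, hcell2, hybMat_row _ _ _ _ hi, PySem.List.pySetD_natCast,
        PySem.List.pySetD_natCast]
    have hval : ((((i - 1) + j).choose (i - 1) : Nat) : Int) + (((i + (j - 1)).choose i : Nat) : Int)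
        = (((i + j).choose i : Nat) : Int) := by
      rw [← Nat.cast_add, pascal_add i j hi1 hj1]
    rw [hval, hybRow_set _ _ _ hj, hybMat_set]
    rfl

lemma specMat_last (n m : Nat) :
    specMat n n m = (List.range n).map (fun i => specRow i m) := by
  unfold specMat
  refine List.map_congr_left ?_
  intro k hk
  simp only [List.mem_range] at hk
  rw [if_pos hk]

lemma inner_all (n m : Int) (i : Nat) (hi : i < n.toNat) :
    (PySem.List.pyRange 0 m 1).foldl (fun mat j => pvInner mat (i : Int) j)
        (specMat i n.toNat m.toNat)
      = specMat (i + 1) n.toNat m.toNat := by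
  rw [PySem.List.pyRange_one, List.foldl_map]
  simp only [zero_add, Int.sub_zero]
  have key : ∀ j0 ≤ m.toNat,
      (List.range j0).foldl (fun mat (j : Nat) => pvInner mat (i : Int) (j : Int))
          (specMat i n.toNat m.toNat)
        = hybMat i n.toNat m.toNat j0 := by
    intro j0
    induction j0 with
    | zero => intro _; simp [hybMat_zero]
    | succ j0 ihj =>
      intro hle
      rw [List.range_succ, List.foldl_append, ihj (by omega)]
      simp only [List.foldl_cons, List.foldl_nil]
      exact inner_step n m i j0 hi (by omega)
  rw [key m.toNat le_rfl, hybMat_full]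

lemma buildMat_eq (n m : Int) :
    pvBuildMat n m = (List.range n.toNat).map (fun i => specRow i m.toNat) := by
  have hbody : pvBuildMat n m
      = (PySem.List.pyRange 0 n 1).foldl
          (fun mat i => (PySem.List.pyRange 0 m 1).foldl (fun mat j => pvInner mat i j) mat)
          ((PySem.List.pyRange 0 n 1).map (fun _ => List.replicate m.toNat (0 : Int))) := rfl
  rw [hbody, PySem.List.pyRange_one 0 n, List.foldl_map, List.map_map]
  simp only [zero_add, Int.sub_zero]
  have hmat0 : (List.range n.toNat).map
      ((fun _ => List.replicate m.toNat (0 : Int)) ∘ (fun k : Nat => (k : Int)))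
      = specMat 0 n.toNat m.toNat := by
    unfold specMat
    refine List.map_congr_left ?_
    intro k _
    simp
  rw [hmat0]
  have key : ∀ i0 ≤ n.toNat,
      (List.range i0).foldl
          (fun mat (i : Nat) => (PySem.List.pyRange 0 m 1).foldl
            (fun mat j => pvInner mat (i : Int) j) mat)
          (specMat 0 n.toNat m.toNat)
        = specMat i0 n.toNat m.toNat := by
    intro i0
    induction i0 with
    | zero => intro _; simp
    | succ i0 ihi =>
      intro hle
      rw [List.range_succ, List.foldl_append, ihi (by omega)]
      simp only [List.foldl_cons, List.foldl_nil]
      exact inner_all n m i0 (by omega)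
  rw [key n.toNat le_rfl, specMat_last]

lemma comb_fold (a : Nat) : ∀ t : Nat, t ≤ a →
    (List.range t).foldl (fun c (u : Nat) => PySem.Int.floordiv (c * ((a : Int) - u)) (u + 1)) 1
      = (a.choose t : Int) := by
  intro t
  induction t with
  | zero => intro _; simp
  | succ t ih =>
    intro ht
    rw [List.range_succ, List.foldl_append, ih (by omega)]
    simp only [List.foldl_cons, List.foldl_nil]
    have h1 : (a : Int) - t = ((a - t : Nat) : Int) := by push_cast [Nat.cast_sub (by omega : t ≤ a)]; ring
    have h2 : ((t : Int) + 1) = ((t + 1 : Nat) : Int) := by push_cast; ring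
    rw [h1, h2, ← Nat.cast_mul, ← Nat.choose_succ_right_eq, PySem.Int.floordiv_natCast]
    rw [Nat.mul_div_cancel _ (by omega)]

lemma comb_eq (a k : Nat) (h : k ≤ a) : pvComb (a : Int) (k : Int) = (a.choose k : Int) := by
  unfold pvComb
  rw [if_neg (by omega)]
  rw [PySem.List.pyRange_one]
  have hk : ((k : Int) - 0).toNat = k := by omega
  rw [hk, List.foldl_map]
  simp only [zero_add]
  exact comb_fold a k h

-- path validity: every table access of get_num is inside the table
def Ok (n m : Int) : List Char → Int → Int → Prop
  | [], _, _ => True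
  | c :: rest, i, j =>
    if c = 'R' then Ok n m rest i (j - 1)
    else if j = 0 then Ok n m rest (i - 1) j
    else (0 ≤ i ∧ i < n ∧ 1 ≤ j ∧ j < m) ∧ Ok n m rest (i - 1) j

lemma pre_to_ok (n m : Int) (l : List Char) (i j : Int)
    (hi : i ≤ n - 1) (hj : j ≤ m - 1)
    (H : ∀ k ∈ List.range l.length,
      (l.getD k ' ' ≠ 'R' ∧ j - ((l.take k).count 'R' : Int) ≠ 0) →
      ((k : Int) - ((l.take k).count 'R' : Int) ≤ i ∧ ((l.take k).count 'R' : Int) ≤ j - 1)) :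
    Ok n m l i j := by
  induction l generalizing i j with
  | nil => trivial
  | cons c rest ih =>
    simp only [Ok]
    by_cases hc : c = 'R'
    · rw [if_pos hc]
      refine ih i (j - 1) hi (by omega) ?_
      intro k hk hg
      have hk' : k + 1 ∈ List.range (c :: rest).length := by
        simp only [List.mem_range, List.length_cons] at hk ⊢; omega
      have hcnt : ((((c :: rest).take (k + 1)).count 'R' : Nat) : Int)
          = ((rest.take k).count 'R' : Int) + 1 := by
        simp [List.take_succ_cons, hc]
      have h2 := hg.2
      have h3 := H (k + 1) hk' ⟨by simpa using hg.1, by rw [hcnt]; omega⟩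
      rw [hcnt] at h3
      push_cast at h3 ⊢
      omega
    · have H' : ∀ k ∈ List.range rest.length,
          (rest.getD k ' ' ≠ 'R' ∧ j - ((rest.take k).count 'R' : Int) ≠ 0) →
          ((k : Int) - ((rest.take k).count 'R' : Int) ≤ i - 1 ∧
           ((rest.take k).count 'R' : Int) ≤ j - 1) := by
        intro k hk hg
        have hk' : k + 1 ∈ List.range (c :: rest).length := by
          simp only [List.mem_range, List.length_cons] at hk ⊢; omega
        have hcnt : ((((c :: rest).take (k + 1)).count 'R' : Nat) : Int)
            = ((rest.take k).count 'R' : Int) := by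
          simp [List.take_succ_cons, hc]
        have h2 := hg.2
        have h3 := H (k + 1) hk' ⟨by simpa using hg.1, by rw [hcnt]; omega⟩
        rw [hcnt] at h3
        push_cast at h3 ⊢
        omega
      rw [if_neg hc]
      by_cases hj0 : j = 0
      · rw [if_pos hj0]
        exact ih (i - 1) j (by omega) hj H'
      · rw [if_neg hj0]
        have h0 := H 0 (by simp [List.mem_range]) ⟨by simpa using hc, by simpa using hj0⟩
        simp only [List.take_zero, List.count_nil, Nat.cast_zero] at h0
        exact ⟨⟨by omega, by omega, by omega, by omega⟩, ih (i - 1) j (by omega) hj H'⟩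

lemma main_lemma (n m : Int) (l : List Char) : ∀ (i j t : Int), Ok n m l i j →
    ∃ s, pvGetNum (pvBuildMat n m) l i j = some s ∧
      (l.foldl pvStep (i, j, t)).2.2 = t + s := by
  induction l with
  | nil => intro i j t _; exact ⟨0, rfl, by simp⟩
  | cons c rest ih =>
    intro i j t hok
    simp only [Ok] at hok
    simp only [pvGetNum, List.foldl_cons]
    by_cases hc : c = 'R'
    · rw [if_pos hc] at hok ⊢
      have hstep : pvStep (i, j, t) c = (i, j - 1, t) := by simp [pvStep, hc]
      rw [hstep]
      exact ih i (j - 1) t hok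
    · rw [if_neg hc] at hok ⊢
      by_cases hj0 : j = 0
      · rw [if_pos hj0] at hok ⊢
        have hstep : pvStep (i, j, t) c = (i - 1, j, t) := by simp [pvStep, hc, hj0]
        rw [hstep]
        exact ih (i - 1) j t hok
      · rw [if_neg hj0] at hok ⊢
        obtain ⟨⟨h0i, hin, h1j, hjm⟩, hrest⟩ := hok
        have hrow : PySem.List.pyGet? (pvBuildMat n m) i = some (specRow i.toNat m.toNat) := by
          rw [buildMat_eq, PySem.List.pyGet?_of_nonneg _ h0i]
          have hlt : i.toNat < n.toNat := by omega
          simp [hlt]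
        have hv : PySem.List.pyGet? (specRow i.toNat m.toNat) (j - 1)
            = some (((i.toNat + (j - 1).toNat).choose i.toNat : Nat) : Int) := by
          rw [PySem.List.pyGet?_of_nonneg _ (by omega : (0:Int) ≤ j - 1)]
          have hlt : j.toNat - 1 < m.toNat := by omega
          have hjj : (j - 1).toNat = j.toNat - 1 := by omega
          simp [specRow, hjj, hlt]
        have hstep : pvStep (i, j, t) c = (i - 1, j, t + pvComb (i + j - 1) i) := by
          simp [pvStep, hc, hj0]
        rw [hstep]
        obtain ⟨s', hs1, hs2⟩ := ih (i - 1) j (t + pvComb (i + j - 1) i) hrest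
        have hcomb : pvComb (i + j - 1) i
            = (((i.toNat + (j - 1).toNat).choose i.toNat : Nat) : Int) := by
          have h1 : i + j - 1 = ((i.toNat + (j - 1).toNat : Nat) : Int) := by push_cast; omega
          have h2 : i = ((i.toNat : Nat) : Int) := by omega
          have h3 := comb_eq (i.toNat + (j - 1).toNat) i.toNat (by omega)
          rw [← h1, ← h2] at h3
          exact h3
        refine ⟨(((i.toNat + (j - 1).toNat).choose i.toNat : Nat) : Int) + s', ?_, ?_⟩
        · simp only [hrow, hv, hs1, Option.map_some]
        · rw [hs2, hcomb]; ring

-- ===== VERDICT (by name: the statement is the Claim_ definition above) =====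
theorem solution_spec : Claim_equal_solution := by
  intro way n m _ hpre
  unfold Spec_solution solution solution_alt
  have hok : Ok n m way.toList (n - 1) (m - 1) := by
    refine pre_to_ok n m way.toList (n - 1) (m - 1) (by omega) (by omega) ?_
    intro k hk hg
    obtain ⟨h1, h2⟩ := hpre k hk hg
    exact ⟨by omega, by omega⟩
  obtain ⟨s, h1, h2⟩ := main_lemma n m way.toList (n - 1) (m - 1) 0 hok
  rw [h1, h2]
  show s + 1 = 0 + s + 1
  omega
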